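-- pv_equiv track=rewrite | github.com/mtyton/OnlineShop | shop/crm/utils.py | create_data_packages
-- ===== SOURCE A (Python) =====
-- def create_data_packages(post_data, number_of_forms):
--     processed_data = []
--     partial_data = {}
--     for f in range(0, number_of_forms):
--         for key in post_data.keys():
--             try:
--                 partial_data[key] = post_data[key][f]
--             except IndexError:
--                 pass
--         processed_data.append(partial_data)
--         partial_data = {}
--     return processed_data
-- ===== SOURCE B (Python) =====
-- def create_data_packages(post_data, number_of_forms):
--     # Peel heads off shrinking per-key tails: exhausted keys are dropped,
--     # the loop stops as soon as every tail is empty, remaining forms are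
--     # padded with empty dicts.
--     processed = []
--     tails = [(k, vs) for k, vs in post_data.items() if vs]
--     while len(processed) < number_of_forms and tails:
--         processed.append({k: vs[0] for k, vs in tails})
--         tails = [(k, vs[1:]) for k, vs in tails if len(vs) > 1]
--     processed.extend({} for _ in range(number_of_forms - len(processed)))
--     return processed
-- ===== Notes on version B (the rewrite author's own statement) =====
-- stated objective: faster
-- what changed: A loops forms-outer/keys-inner, indexing every key's list at every form index and catching IndexError; B maintains a shrinking list of (key, remaining-values) tails, peels the head of each tail per form, drops exhausted keys, stops as soon as all tails are empty and pads the rest with empty dicts, so exhausted keys and exhausted data cost nothing.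
import Mathlib
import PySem

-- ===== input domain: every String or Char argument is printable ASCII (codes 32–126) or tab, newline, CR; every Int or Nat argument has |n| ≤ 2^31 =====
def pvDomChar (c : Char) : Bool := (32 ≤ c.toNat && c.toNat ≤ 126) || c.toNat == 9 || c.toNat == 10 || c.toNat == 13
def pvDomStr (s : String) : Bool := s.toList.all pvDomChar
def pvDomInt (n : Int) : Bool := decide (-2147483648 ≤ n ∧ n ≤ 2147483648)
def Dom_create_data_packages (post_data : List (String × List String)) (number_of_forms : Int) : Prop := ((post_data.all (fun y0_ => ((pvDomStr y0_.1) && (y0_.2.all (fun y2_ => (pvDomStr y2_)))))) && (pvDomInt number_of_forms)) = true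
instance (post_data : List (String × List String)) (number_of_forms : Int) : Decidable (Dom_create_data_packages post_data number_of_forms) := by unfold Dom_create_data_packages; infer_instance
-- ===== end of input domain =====

-- B replaces A's forms-outer/keys-inner indexing loop (with try/except IndexError) by
-- peeling the heads off a shrinking list of (key, remaining-values) tails, dropping
-- exhausted keys, stopping once all tails are empty and padding with empty dicts
-- (objective: faster when the number of forms exceeds the value-list lengths).

-- ===== PORT A =====
-- A: for f in range(0, n): for key in dict: try partial[key] = dict[key][f] except IndexError: pass
def create_data_packages (post_data : List (String × List String)) (number_of_forms : Int) : List (List (String × String)) :=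
  let d := PySem.Dict.ofList post_data
  (PySem.List.pyRange 0 number_of_forms 1).foldl
    (fun processed f =>
      processed ++
        [ (d.items.foldl
            (fun partial_ kv =>
              match PySem.List.pyGet? kv.2 f with
              | some v => partial_.insert kv.1 v
              | none => partial_)          -- except IndexError: pass
            PySem.Dict.empty).items ])
    []

-- ===== PORT B =====
-- Source B's while loop, as fuel recursion on the number of forms still to produce;
-- the base 'tails empty' case is the trailing processed.extend({} …) padding.
def pvPeelB (tails : List (String × List String)) : Nat → List (List (String × String))
  | 0 => []
  | r + 1 =>
    if tails.isEmpty then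
      List.replicate (r + 1) []         -- processed.extend({} for _ in range(...))
    else
      -- processed.append({k: vs[0] for k, vs in tails})  (vs nonempty by construction)
      (tails.foldl (fun pd kv => pd.insert kv.1 (PySem.List.pyGetD kv.2 0 "")) PySem.Dict.empty).items ::
        -- tails = [(k, vs[1:]) for k, vs in tails if len(vs) > 1]
        pvPeelB (tails.filterMap (fun kv =>
          if 1 < kv.2.length then some (kv.1, PySem.List.slice kv.2 (some 1) none) else none)) r

def create_data_packages_alt (post_data : List (String × List String)) (number_of_forms : Int) : List (List (String × String)) :=
  let d := PySem.Dict.ofList post_data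
  -- tails = [(k, vs) for k, vs in post_data.items() if vs]
  pvPeelB (d.items.filter (fun kv => !kv.2.isEmpty)) number_of_forms.toNat

-- ===== PRECONDITION & SPEC =====
def Spec_create_data_packages (post_data : List (String × List String)) (number_of_forms : Int) (out : List (List (String × String))) : Prop := out = create_data_packages_alt post_data number_of_forms
instance (post_data : List (String × List String)) (number_of_forms : Int) (out : List (List (String × String))) : Decidable (Spec_create_data_packages post_data number_of_forms out) := by unfold Spec_create_data_packages; infer_instance

-- ===== CLAIM (what is proved, stated in full; the proofs are below) =====
def Claim_equal_create_data_packages : Prop := ∀ (post_data : List (String × List String)) (number_of_forms : Int), Dom_create_data_packages post_data number_of_forms → Spec_create_data_packages post_data number_of_forms (create_data_packages post_data number_of_forms)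

-- ===== LEMMAS AND PROOFS =====

-- Reference value: form dict number f, as an items list.
def pvForm (items : List (String × List String)) (f : Nat) : List (String × String) :=
  items.filterMap (fun kv => (kv.2[f]?).map (fun v => (kv.1, v)))

-- The tails alive after f head-peels.
def pvTails (items : List (String × List String)) (f : Nat) : List (String × List String) :=
  items.filterMap (fun kv => if f < kv.2.length then some (kv.1, kv.2.drop f) else none)

-- a filterMap that preserves the key component keeps the key list a sublist
theorem pv_fst_filterMap_sublist {β γ : Type} (items : List (String × β))
    (g : String × β → Option (String × γ)) (hg : ∀ kv w, g kv = some w → w.1 = kv.1) :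
    ((items.filterMap g).map Prod.fst).Sublist (items.map Prod.fst) := by
  induction items with
  | nil => simp
  | cons kv items ih =>
    rw [List.filterMap_cons]
    cases h : g kv with
    | none => exact (ih).trans (List.sublist_cons_self _ _)
    | some w =>
      rw [List.map_cons, List.map_cons, hg kv w h]
      exact List.Sublist.cons₂ _ ih

theorem pv_nodup_fst_filterMap {β γ : Type} (items : List (String × β))
    (g : String × β → Option (String × γ)) (hg : ∀ kv w, g kv = some w → w.1 = kv.1)
    (hnd : (items.map Prod.fst).Nodup) : ((items.filterMap g).map Prod.fst).Nodup :=
  (pv_fst_filterMap_sublist items g hg).nodup hnd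

-- a fold inserting pairwise-distinct fresh keys into the empty dict lists exactly those pairs
theorem pv_items_fold_insert (l : List (String × String)) (hnd : (l.map Prod.fst).Nodup) :
    (l.foldl (fun pd kv => pd.insert kv.1 kv.2) (PySem.Dict.empty : PySem.Dict String String)).items = l := by
  have h := PySem.Dict.items_foldl_insert_fresh (l := l) (k := Prod.fst) (v := Prod.snd)
    (d := (PySem.Dict.empty : PySem.Dict String String))
    (by intro a _; exact PySem.Dict.contains_empty a.1) hnd
  simpa using h

-- A's inner loop (conditional insert) is the plain insert fold over pvForm
theorem pv_fold_match_eq (items : List (String × List String)) (f : Nat)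
    (pd : PySem.Dict String String) :
    items.foldl
      (fun partial_ kv =>
        match PySem.List.pyGet? kv.2 ((f : Nat) : Int) with
        | some v => partial_.insert kv.1 v
        | none => partial_) pd
    = (pvForm items f).foldl (fun pd kv => pd.insert kv.1 kv.2) pd := by
  induction items generalizing pd with
  | nil => rfl
  | cons kv items ih =>
    rw [pvForm, List.filterMap_cons]
    have : PySem.List.pyGet? kv.2 ((f : Nat) : Int) = kv.2[f]? := by
      simp [PySem.List.pyGet?_natCast]
    rw [List.foldl_cons, this]
    cases h : kv.2[f]? with
    | none => simpa [h, pvForm] using ih pd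
    | some v => simpa [h, pvForm] using ih (pd.insert kv.1 v)

-- A's form-f dict, as items
theorem pv_A_form (items : List (String × List String)) (f : Nat)
    (hnd : (items.map Prod.fst).Nodup) :
    (items.foldl
      (fun partial_ kv =>
        match PySem.List.pyGet? kv.2 ((f : Nat) : Int) with
        | some v => partial_.insert kv.1 v
        | none => partial_) PySem.Dict.empty).items = pvForm items f := by
  rw [pv_fold_match_eq]
  exact pv_items_fold_insert _ (pv_nodup_fst_filterMap items _ (by
    intro kv w h
    cases hx : kv.2[f]? with
    | none => simp [hx] at h
    | some v => simp [hx] at h; simp [← h]) hnd)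

-- head of the tail after f peels is element f
theorem pv_package_eq (items : List (String × List String)) (f : Nat) :
    (pvTails items f).map (fun kv => (kv.1, PySem.List.pyGetD kv.2 0 "")) = pvForm items f := by
  unfold pvTails pvForm
  rw [List.map_filterMap]
  apply List.filterMap_congr
  intro kv _
  by_cases hc : f < kv.2.length
  · have hget : kv.2[f]? = some (kv.2[f]'hc) := List.getElem?_eq_getElem hc
    have hval : PySem.List.pyGetD (kv.2.drop f) 0 "" = kv.2[f]?.getD "" := by
      simpa using PySem.List.pyGetD_natCast (kv.2.drop f) 0 ""
    simp [hc, hval]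
  · simp [hc]

-- peeling one more head advances pvTails
theorem pv_tails_step (items : List (String × List String)) (f : Nat) :
    (pvTails items f).filterMap (fun kv =>
        if 1 < kv.2.length then some (kv.1, PySem.List.slice kv.2 (some 1) none) else none)
    = pvTails items (f + 1) := by
  unfold pvTails
  rw [List.filterMap_filterMap]
  apply List.filterMap_congr
  intro kv _
  by_cases hc : f < kv.2.length
  · rw [if_pos hc]
    simp only [Option.bind_some, List.length_drop]
    by_cases hc1 : f + 1 < kv.2.length
    · rw [if_pos (by omega : 1 < kv.2.length - f), if_pos hc1,
        PySem.List.slice_from _ (by norm_num)]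
      simp [List.drop_drop]
    · rw [if_neg (by omega : ¬ 1 < kv.2.length - f), if_neg hc1]
  · have hc1 : ¬ f + 1 < kv.2.length := by omega
    simp [hc, hc1]

-- if no tails survive f peels, every later form is empty
theorem pv_form_empty_of_tails_empty (items : List (String × List String)) (f g : Nat)
    (h : pvTails items f = []) (hfg : f ≤ g) : pvForm items g = [] := by
  unfold pvTails at h
  rw [List.filterMap_eq_nil_iff] at h
  unfold pvForm
  rw [List.filterMap_eq_nil_iff]
  intro kv hkv
  have := h kv hkv
  by_cases hc : f < kv.2.length
  · simp [hc] at this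
  · simp [List.getElem?_eq_none (by omega : kv.2.length ≤ g)]

-- the while-loop invariant: peeling from pvTails items f for r more forms
theorem pv_peel_eq (items : List (String × List String)) (hnd : (items.map Prod.fst).Nodup) :
    ∀ (r f : Nat), pvPeelB (pvTails items f) r = (List.range r).map (fun j => pvForm items (f + j)) := by
  intro r
  induction r with
  | zero => intro f; simp [pvPeelB]
  | succ r ih =>
    intro f
    rw [pvPeelB]
    by_cases he : pvTails items f = []
    · rw [if_pos (by simp [he])]
      symm
      rw [List.eq_replicate_iff]
      refine ⟨by simp, ?_⟩
      intro b hb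
      obtain ⟨j, _, hj⟩ := List.mem_map.mp hb
      rw [← hj, pv_form_empty_of_tails_empty items f (f + j) he (by omega)]
    · rw [if_neg (by simpa using he)]
      have hpkg : (List.foldl (fun pd kv => pd.insert kv.1 (PySem.List.pyGetD kv.2 0 ""))
          PySem.Dict.empty (pvTails items f)).items = pvForm items f := by
        have hfold : List.foldl (fun pd kv => pd.insert kv.1 (PySem.List.pyGetD kv.2 0 ""))
            (PySem.Dict.empty : PySem.Dict String String) (pvTails items f)
            = ((pvTails items f).map (fun kv => (kv.1, PySem.List.pyGetD kv.2 0 ""))).foldl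
                (fun pd kv => pd.insert kv.1 kv.2) PySem.Dict.empty := by
          rw [List.foldl_map]
        rw [hfold, pv_items_fold_insert, pv_package_eq]
        rw [pv_package_eq]
        exact pv_nodup_fst_filterMap items _ (by
          intro kv w h
          by_cases hc : f < kv.2.length
          · simp [hc] at h; simp [← h]
          · simp [hc] at h) hnd
      rw [hpkg, pv_tails_step, ih (f + 1)]
      rw [List.range_succ_eq_map, List.map_cons, List.map_map]
      simp only [Nat.add_zero]
      congr 1
      apply List.map_congr_left
      intro j _
      simp only [Function.comp]
      congr 1
      omega

-- the initial filter is pvTails at 0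
theorem pv_tails_zero (items : List (String × List String)) :
    items.filter (fun kv => !kv.2.isEmpty) = pvTails items 0 := by
  unfold pvTails
  induction items with
  | nil => rfl
  | cons kv items ih =>
    rw [List.filter_cons, List.filterMap_cons]
    by_cases h : kv.2 = []
    · simp [h]
      exact ih
    · have hpos : 0 < kv.2.length := List.length_pos_of_ne_nil h
      simp [h, hpos]
      exact ih

-- ===== VERDICT (by name: the statement is the Claim_ definition above) =====
theorem create_data_packages_spec : Claim_equal_create_data_packages := by
  intro post_data n _
  unfold Spec_create_data_packages create_data_packages create_data_packages_alt
  simp only []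
  set d := PySem.Dict.ofList post_data with hd
  have hnd : (d.items.map Prod.fst).Nodup := PySem.Dict.nodup_keys_ofList post_data
  rw [PySem.List.foldl_append_singleton_eq_map]
  rw [pv_tails_zero, pv_peel_eq d.items hnd n.toNat 0]
  rw [PySem.List.pyRange_one 0 n]
  rw [List.map_map]
  simp only [Int.sub_zero]
  apply List.map_congr_left
  intro j _
  simp only [Function.comp, zero_add]
  exact pv_A_form d.items j hnd
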